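-- pv_equiv track=rewrite | github.com/Tapassurampudi/DAA-codes | flip.py | update_boundary_to_1
-- ===== SOURCE A (Python) =====
-- def update_boundary_to_1(matrix):
--     if not matrix:
--         return matrix
--
--
--     num_rows = len(matrix)
--     num_cols = len(matrix[0])
--
--     for i in range(num_cols):
--         matrix[0][i] = 1
--         matrix[num_rows - 1][i] = 1
--
--     for i in range(1, num_rows - 1):
--         matrix[i][0] = 1
--         matrix[i][num_cols - 1] = 1
--
--     return matrix
-- ===== SOURCE B (Python) =====
-- def update_boundary_to_1(matrix):
--     if not matrix:
--         return matrix
--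
--     num_rows = len(matrix)
--     num_cols = len(matrix[0])
--
--     for i in range(num_rows):
--         row = matrix[i]
--         for j in range(num_cols):
--             if i == 0 or i == num_rows - 1 or j == 0 or j == num_cols - 1:
--                 row[j] = 1
--     return matrix
-- ===== Notes on version B (the rewrite author's own statement) =====
-- stated objective: simpler
-- what changed: Replaces A's two selective perimeter walks (a column loop touching the first and last rows, then a row loop touching the first and last columns) by a single uniform 2-D pass over all cells that sets a cell to 1 exactly when a boundary predicate holds; B mutates in place and returns the same object, like A.
-- intended difference: On matrices whose first row is empty (num_cols == 0) but which have a nonempty interior row whose first or last element is not 1, A's `matrix[i][num_cols - 1] = 1` becomes `matrix[i][-1] = 1` and negative-index wraparound sets the first and last elements of every interior row, while B leaves a zero-width-boundary matrix untouched; B's value is intended because with zero declared columns there are no boundary columns to set and A's writes are an indexing accident. — e.g. on update_boundary_to_1([[], [0], []]): A returns [[], [1], []], B returns [[], [0], []]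
import Mathlib
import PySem

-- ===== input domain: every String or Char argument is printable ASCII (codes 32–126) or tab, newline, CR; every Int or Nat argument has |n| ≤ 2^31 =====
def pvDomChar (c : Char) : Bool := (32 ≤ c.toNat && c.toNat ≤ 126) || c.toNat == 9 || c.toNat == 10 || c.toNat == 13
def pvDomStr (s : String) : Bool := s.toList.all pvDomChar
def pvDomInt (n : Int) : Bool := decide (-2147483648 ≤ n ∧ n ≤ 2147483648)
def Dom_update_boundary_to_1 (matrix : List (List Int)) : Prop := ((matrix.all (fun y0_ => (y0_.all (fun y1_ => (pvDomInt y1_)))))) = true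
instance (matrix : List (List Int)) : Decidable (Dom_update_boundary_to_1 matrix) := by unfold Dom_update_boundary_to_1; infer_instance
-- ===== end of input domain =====

-- B replaces A's two selective perimeter walks by one uniform 2-D pass guarded by a
-- boundary predicate (objective: simpler).  Both Pythons mutate `matrix` in place and
-- return the same object; the equivalence proved here is about the return value.

-- ===== PORT A =====
-- matrix[i][j] = 1  (Python indexing, possibly negative; out of range = IndexError, excluded by Pre_)
def setA (m : List (List Int)) (i j : Int) : List (List Int) :=
  PySem.List.pySetD m i (PySem.List.pySetD (PySem.List.pyGetD m i []) j 1)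

def update_boundary_to_1 (matrix : List (List Int)) : List (List Int) :=
  if matrix = [] then matrix
  else
    let num_rows : Int := matrix.length
    let num_cols : Int := (PySem.List.pyGetD matrix 0 []).length
    let m1 := (PySem.List.pyRange 0 num_cols 1).foldl
      (fun m i => setA (setA m 0 i) (num_rows - 1) i) matrix
    (PySem.List.pyRange 1 (num_rows - 1) 1).foldl
      (fun m i => setA (setA m i 0) i (num_cols - 1)) m1

-- ===== PORT B =====
def update_boundary_to_1_alt (matrix : List (List Int)) : List (List Int) :=
  if matrix = [] then matrix
  else
    let numRows := matrix.length
    let numCols := (matrix.getD 0 []).length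
    (List.range numRows).foldl (fun m i =>
      (List.range numCols).foldl (fun m2 j =>
        if i = 0 ∨ i = numRows - 1 ∨ j = 0 ∨ j = numCols - 1 then
          m2.set i ((m2.getD i []).set j 1)
        else m2) m) matrix

-- ===== PRECONDITION & SPEC =====
-- Pre_ = exactly the inputs where Python A returns (no IndexError): when the first row is
-- nonempty, the last row and every interior row must be at least as long as the first row;
-- when the first row is empty, every interior row must be nonempty.
def Pre_update_boundary_to_1 (matrix : List (List Int)) : Prop :=
  ((matrix.getD 0 []).length = 0 → ∀ r ∈ (matrix.drop 1).dropLast, r ≠ []) ∧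
  ((matrix.getD 0 []).length ≠ 0 →
     (matrix.getD 0 []).length ≤ (matrix.getLastD []).length ∧
     ∀ r ∈ (matrix.drop 1).dropLast, (matrix.getD 0 []).length ≤ r.length)
instance (matrix : List (List Int)) : Decidable (Pre_update_boundary_to_1 matrix) := by
  unfold Pre_update_boundary_to_1; infer_instance
def pvWitness_update_boundary_to_1 : List (List Int) := [[2, 3], [4, 5]]

-- On matrices whose first row is empty but which have a nonempty interior row whose first or
-- last element is not 1, A's `matrix[i][num_cols - 1] = 1` becomes `matrix[i][-1] = 1` and
-- negative-index wraparound sets the first and last elements of every interior row; B leaves a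
-- zero-width-boundary matrix untouched, which is intended: with zero declared columns there is
-- no boundary column to set, and A's writes are an indexing accident.
def D_update_boundary_to_1 (matrix : List (List Int)) : Prop :=
  matrix ≠ [] ∧ matrix.getD 0 [] = [] ∧
  ∃ r ∈ (matrix.drop 1).dropLast, r ≠ [] ∧ (r.headI ≠ 1 ∨ r.getLastD 0 ≠ 1)
instance (matrix : List (List Int)) : Decidable (D_update_boundary_to_1 matrix) := by
  unfold D_update_boundary_to_1; infer_instance

def Spec_update_boundary_to_1 (matrix : List (List Int)) (out : List (List Int)) : Prop :=
  ¬ D_update_boundary_to_1 matrix → out = update_boundary_to_1_alt matrix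
instance (matrix : List (List Int)) (out : List (List Int)) : Decidable (Spec_update_boundary_to_1 matrix out) := by
  unfold Spec_update_boundary_to_1; infer_instance

def pvDiffWitness_update_boundary_to_1 : List (List Int) := [[], [0], []]
def pvDiffWitnessOut_update_boundary_to_1 : (List (List Int)) × (List (List Int)) :=
  ([[], [1], []], [[], [0], []])

-- ===== CLAIM (what is proved, stated in full; the proofs are below) =====
def Claim_unchanged_update_boundary_to_1 : Prop := ∀ (matrix : List (List Int)), Dom_update_boundary_to_1 matrix → Pre_update_boundary_to_1 matrix → Spec_update_boundary_to_1 matrix (update_boundary_to_1 matrix)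
def Claim_changed_update_boundary_to_1 : Prop := Dom_update_boundary_to_1 (pvDiffWitness_update_boundary_to_1) ∧ Pre_update_boundary_to_1 (pvDiffWitness_update_boundary_to_1) ∧ D_update_boundary_to_1 (pvDiffWitness_update_boundary_to_1) ∧ update_boundary_to_1 (pvDiffWitness_update_boundary_to_1) = pvDiffWitnessOut_update_boundary_to_1.1 ∧ update_boundary_to_1_alt (pvDiffWitness_update_boundary_to_1) = pvDiffWitnessOut_update_boundary_to_1.2 ∧ pvDiffWitnessOut_update_boundary_to_1.1 ≠ pvDiffWitnessOut_update_boundary_to_1.2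
def Claim_exact_update_boundary_to_1 : Prop := ∀ (matrix : List (List Int)), Dom_update_boundary_to_1 matrix → Pre_update_boundary_to_1 matrix → D_update_boundary_to_1 matrix → update_boundary_to_1 matrix ≠ update_boundary_to_1_alt matrix

-- ===== LEMMAS AND PROOFS =====

-- row update at Nat indices, the common step shape of both ports
def updRC (m : List (List Int)) (i j : Nat) : List (List Int) :=
  m.set i ((m.getD i []).set j 1)

-- a row with columns 0..c-1 all set to 1
def allSet (c : Nat) (r : List Int) : List Int :=
  (List.range c).foldl (fun r j => r.set j 1) r

-- an interior row with columns 0 and c-1 set to 1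
def midSet (c : Nat) (r : List Int) : List Int := (r.set 0 1).set (c - 1) 1

-- what A does to an interior row when num_cols = 0 (indices 0 and -1)
def gA (r : List Int) : List Int := PySem.List.pySetD (r.set 0 1) (-1) 1

lemma set_getD_self (l : List (List Int)) (i : Nat) : l.set i (l.getD i []) = l := by
  by_cases h : i < l.length
  · rw [List.getD_eq_getElem?_getD, List.getElem?_eq_getElem h]; exact List.set_getElem_self h
  · exact List.set_eq_of_length_le (by omega)

lemma getD_set_self (m : List (List Int)) (i : Nat) (x : Nat) :
    (m.set i ((m.getD i []).set x 1)).getD i [] = (m.getD i []).set x 1 := by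
  rw [List.getD_eq_getElem?_getD, List.getElem?_set, if_pos rfl]
  by_cases h : i < m.length
  · rw [if_pos h]; rfl
  · rw [if_neg h, List.getD_eq_getElem?_getD,
      List.getElem?_eq_none (show m.length ≤ i by omega)]
    rfl

lemma updRC_getElem? (m : List (List Int)) (i j k : Nat) :
    (updRC m i j)[k]? = if k = i then (m[i]?).map (fun r => r.set j 1) else m[k]? := by
  unfold updRC
  rw [List.getElem?_set]
  by_cases h : i = k
  · subst h
    rw [if_pos rfl, if_pos rfl]
    by_cases h2 : i < m.length
    · rw [if_pos h2, List.getElem?_eq_getElem h2, List.getD_eq_getElem?_getD,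
        List.getElem?_eq_getElem h2]
      rfl
    · rw [if_neg h2, List.getElem?_eq_none (show m.length ≤ i by omega)]
      rfl
  · rw [if_neg h, if_neg (Ne.symm h)]

lemma foldl_id_of_mem {α β : Type} (l : List α) (f : β → α → β) (m : β)
    (h : ∀ a ∈ l, f m a = m) : l.foldl f m = m := by
  induction l with
  | nil => rfl
  | cons a t ih =>
    simp only [List.foldl_cons, h a (by simp)]
    exact ih (fun b hb => h b (by simp [hb]))

-- B's inner loop only touches row i
lemma inner_set_row (l : List Nat) (q : Nat → Prop) [DecidablePred q] (i : Nat) :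
    ∀ m : List (List Int),
      l.foldl (fun m2 j => if q j then m2.set i ((m2.getD i []).set j 1) else m2) m
        = m.set i (l.foldl (fun r j => if q j then r.set j 1 else r) (m.getD i [])) := by
  induction l with
  | nil => intro m; exact (set_getD_self m i).symm
  | cons j t ih =>
    intro m
    by_cases hq : q j
    · simp only [List.foldl_cons, if_pos hq, ih, getD_set_self, List.set_set]
    · simp only [List.foldl_cons, if_neg hq, ih]

-- a fold that rewrites each listed row once, elementwise
lemma outer_rows (h : Nat → List Int → List Int) :
    ∀ (l : List Nat), l.Nodup → ∀ (m : List (List Int)) (k : Nat),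
      (l.foldl (fun m i => m.set i (h i (m.getD i []))) m)[k]?
        = if k ∈ l then (m[k]?).map (h k) else m[k]? := by
  intro l
  induction l with
  | nil => intro _ m k; simp
  | cons i t ih =>
    intro hnd m k
    have hit : i ∉ t := (List.nodup_cons.mp hnd).1
    simp only [List.foldl_cons]
    rw [ih (List.nodup_cons.mp hnd).2]
    by_cases hk : k = i
    · subst hk
      rw [if_neg hit, if_pos (by simp), List.getElem?_set, if_pos rfl]
      by_cases h2 : k < m.length
      · rw [if_pos h2, List.getElem?_eq_getElem h2, List.getD_eq_getElem?_getD,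
          List.getElem?_eq_getElem h2]
        rfl
      · rw [if_neg h2, List.getElem?_eq_none (show m.length ≤ k by omega)]
        rfl
    · have hne : (m.set i (h i (m.getD i [])))[k]? = m[k]? := List.getElem?_set_ne (Ne.symm hk)
      by_cases hkt : k ∈ t
      · rw [if_pos hkt, if_pos (by simp [hkt]), hne]
      · rw [if_neg hkt, if_neg (by simp [hk, hkt]), hne]

lemma allSet_succ (c : Nat) (r : List Int) : allSet (c + 1) r = (allSet c r).set c 1 := by
  unfold allSet; rw [List.range_succ, List.foldl_append]; rfl

-- A's first loop, elementwise: rows 0 and a both get all of columns [0, c) set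
lemma loop1_getElem? (a : Nat) :
    ∀ (c : Nat) (m : List (List Int)) (k : Nat),
      ((List.range c).foldl (fun m j => updRC (updRC m 0 j) a j) m)[k]?
        = if k = 0 ∨ k = a then (m[k]?).map (allSet c) else m[k]? := by
  intro c
  induction c with
  | zero =>
    intro m k
    simp only [List.range_zero, List.foldl_nil]
    split
    · cases h : m[k]? <;> simp [allSet]
    · rfl
  | succ c ih =>
    intro m k
    rw [List.range_succ, List.foldl_append, List.foldl_cons, List.foldl_nil]
    simp only [updRC_getElem?, ih]
    by_cases hka : k = a
    · subst hka
      by_cases h0 : k = 0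
      · subst h0
        cases h : m[0]? <;> simp [allSet_succ, List.set_set]
      · cases h : m[k]? <;> simp [h0, allSet_succ]
    · by_cases h0 : k = 0
      · subst h0
        cases h : m[0]? <;> simp [hka, allSet_succ]
      · simp [hka, h0]

lemma pyRange_zero_cast (n : Nat) :
    PySem.List.pyRange 0 (n : Int) 1 = (List.range n).map Int.ofNat := by
  rw [PySem.List.pyRange_one]
  simp only [Int.sub_zero, Int.toNat_natCast]
  exact List.map_congr_left (by intro a _; simp [Int.ofNat_eq_natCast])

lemma setA_cast (m : List (List Int)) (a b : Nat) :
    setA m (a : Int) (b : Int) = updRC m a b := by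
  simp [setA, updRC]

lemma pySetD_neg_one (xs : List Int) (h : xs ≠ []) :
    PySem.List.pySetD xs (-1) 1 = xs.set (xs.length - 1) 1 := by
  unfold PySem.List.pySetD PySem.List.pySet?
  have : PySem.List.pyIdx? xs.length (-1) = some (xs.length - 1) := by
    simp [PySem.List.pyIdx?]; exact h
  rw [this]
  rfl

lemma gA_nil : gA [] = [] := by decide

lemma gA_eq (r : List Int) (hr : r ≠ []) : gA r = (r.set 0 1).set (r.length - 1) 1 := by
  unfold gA
  rw [pySetD_neg_one _ (by simp [hr]), List.length_set]

lemma getLastD_eq_getElem (r : List Int) (hr : r ≠ []) : r.getLastD 0 = r[r.length - 1]'(by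
    have := List.length_pos_iff.mpr hr; omega) := by
  have h : r.length - 1 < r.length := by have := List.length_pos_iff.mpr hr; omega
  rw [List.getLastD_eq_getLast?, List.getLast?_eq_getElem?, List.getElem?_eq_getElem h]
  rfl

lemma gA_id (r : List Int) (h1 : r.headI = 1) (h2 : r.getLastD 0 = 1) : gA r = r := by
  rcases r with _ | ⟨x, t⟩
  · exact gA_nil
  · have hne : (x :: t) ≠ [] := by simp
    have hx : x = 1 := h1
    subst hx
    rw [gA_eq _ hne]
    have hset0 : ((1 : Int) :: t).set 0 1 = 1 :: t := rfl
    rw [hset0]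
    have hlt : ((1:Int) :: t).length - 1 < ((1:Int) :: t).length := by simp
    have hv : ((1:Int) :: t)[((1:Int) :: t).length - 1]'hlt = 1 := by
      rw [← getLastD_eq_getElem _ hne, h2]
    have hself := List.set_getElem_self hlt
    rw [hv] at hself
    exact hself

lemma gA_ne (r : List Int) (hr : r ≠ []) (hbad : r.headI ≠ 1 ∨ r.getLastD 0 ≠ 1) :
    gA r ≠ r := by
  have hlen : 0 < r.length := List.length_pos_iff.mpr hr
  rw [gA_eq _ hr]
  intro heq
  rcases hbad with hb | hb
  · apply hb
    have h0 : (((r.set 0 1).set (r.length - 1) 1))[0]? = some 1 := by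
      rw [List.getElem?_set]
      by_cases h : r.length - 1 = 0
      · simp [h, hlen]
      · rw [if_neg h, List.getElem?_set, if_pos rfl, if_pos (by omega)]
    rw [heq] at h0
    rcases r with _ | ⟨x, t⟩
    · simp at hr
    · simpa using h0
  · apply hb
    have h0 : (((r.set 0 1).set (r.length - 1) 1))[r.length - 1]? = some 1 := by
      rw [List.getElem?_set, if_pos rfl, if_pos (by simp; omega)]
    rw [heq] at h0
    rw [getLastD_eq_getElem _ hr]
    have := List.getElem?_eq_getElem (l := r) (i := r.length - 1) (by omega)
    rw [this] at h0
    exact (Option.some.injEq _ _).mp h0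

lemma mem_mids (m : List (List Int)) (r : List Int) (k : Nat)
    (h1 : 1 ≤ k) (h2 : k < m.length - 1) (hr : m[k]? = some r) :
    r ∈ (m.drop 1).dropLast := by
  have hk : k < m.length := by omega
  have hlen : ((m.drop 1).dropLast).length = m.length - 1 - 1 := by
    simp [List.length_dropLast]
  have hk1 : k - 1 < ((m.drop 1).dropLast).length := by omega
  have hval : ((m.drop 1).dropLast)[k - 1]'hk1 = m[k]'hk := by
    rw [List.getElem_dropLast, List.getElem_drop]
    congr 1
    omega
  have : m[k]'hk = r := by
    have := List.getElem?_eq_getElem (l := m) (i := k) hk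
    rw [this] at hr; exact (Option.some.injEq _ _).mp hr
  rw [← this, ← hval]
  exact List.getElem_mem hk1

lemma mids_index (m : List (List Int)) (r : List Int)
    (hrm : r ∈ (m.drop 1).dropLast) :
    ∃ k, 1 ≤ k ∧ k < m.length - 1 ∧ m[k]? = some r := by
  obtain ⟨t, ht, hrt⟩ := List.getElem_of_mem hrm
  have hlen : ((m.drop 1).dropLast).length = m.length - 1 - 1 := by
    simp [List.length_dropLast]
  refine ⟨t + 1, by omega, by omega, ?_⟩
  have hk : t + 1 < m.length := by omega
  have hval : ((m.drop 1).dropLast)[t]'ht = m[t + 1]'hk := by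
    rw [List.getElem_dropLast, List.getElem_drop]
    congr 1
    omega
  rw [List.getElem?_eq_getElem hk, ← hval, hrt]

-- ==== characterization of A ====

-- A when num_cols = 0: each interior row r becomes gA r, everything else untouched
lemma portA_c_zero (m : List (List Int)) (hm : m ≠ []) (hc : m.getD 0 [] = []) (k : Nat) :
    (update_boundary_to_1 m)[k]?
      = if 1 ≤ k ∧ k < m.length - 1 then (m[k]?).map gA else m[k]? := by
  unfold update_boundary_to_1
  rw [if_neg hm]
  have hget : PySem.List.pyGetD m 0 [] = m.getD 0 [] := by
    simpa using PySem.List.pyGetD_natCast (xs := m) (n := 0) (d := [])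
  simp only [hget, hc, List.length_nil, Nat.cast_zero]
  rw [PySem.List.pyRange_one_eq_nil (by omega), List.foldl_nil]
  have hL : 1 ≤ m.length := List.length_pos_iff.mpr hm
  have hrange : PySem.List.pyRange 1 ((m.length : Int) - 1) 1
      = (List.range (m.length - 2)).map (fun t => ((t + 1 : Nat) : Int)) := by
    rw [PySem.List.pyRange_one]
    have : ((m.length : Int) - 1 - 1).toNat = m.length - 2 := by omega
    rw [this]
    exact List.map_congr_left (by intro a _; push_cast; ring)
  rw [hrange, List.foldl_map]
  have hstep : ∀ (x : List (List Int)) (t : Nat),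
      setA (setA x ((t + 1 : Nat) : Int) 0) ((t + 1 : Nat) : Int) ((0 : Int) - 1)
        = x.set (t + 1) (gA (x.getD (t + 1) [])) := by
    intro x t
    have h1 : setA x ((t + 1 : Nat) : Int) 0 = x.set (t + 1) ((x.getD (t + 1) []).set 0 1) := by
      simpa [updRC] using setA_cast x (t + 1) 0
    rw [h1]
    unfold setA
    have h2 : PySem.List.pyGetD (x.set (t + 1) ((x.getD (t + 1) []).set 0 1)) ((t + 1 : Nat) : Int) []
        = (x.getD (t + 1) []).set 0 1 := by
      rw [PySem.List.pyGetD_natCast]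
      exact getD_set_self x (t + 1) 0
    rw [h2, PySem.List.pySetD_natCast, List.set_set]
    norm_num [gA]
  simp only [hstep]
  have hfold := outer_rows (fun _ r => gA r)
    ((List.range (m.length - 2)).map (fun t => t + 1))
    (by
      refine List.Nodup.map ?_ (List.nodup_range)
      intro a b hab; simpa using hab)
    m k
  simp only [List.foldl_map] at hfold
  rw [hfold]
  have hmem : (k ∈ (List.range (m.length - 2)).map (fun t => t + 1)) ↔ (1 ≤ k ∧ k < m.length - 1) := by
    simp only [List.mem_map, List.mem_range]
    constructor
    · rintro ⟨t, ht, rfl⟩; omega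
    · rintro ⟨h1, h2⟩; exact ⟨k - 1, by omega, by omega⟩
  by_cases hk : 1 ≤ k ∧ k < m.length - 1
  · rw [if_pos (hmem.mpr hk), if_pos hk]
  · rw [if_neg (fun hx => hk (hmem.mp hx)), if_neg hk]

-- A when num_cols = c > 0, elementwise
lemma portA_c_pos (m : List (List Int)) (hm : m ≠ []) (hc : (m.getD 0 []).length ≠ 0) (k : Nat) :
    (update_boundary_to_1 m)[k]?
      = if k = 0 ∨ k = m.length - 1 then (m[k]?).map (allSet (m.getD 0 []).length)
        else if 1 ≤ k ∧ k < m.length - 1 then (m[k]?).map (midSet (m.getD 0 []).length)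
        else m[k]? := by
  set c := (m.getD 0 []).length with hcdef
  have hL : 1 ≤ m.length := List.length_pos_iff.mpr hm
  unfold update_boundary_to_1
  rw [if_neg hm]
  have hget : PySem.List.pyGetD m 0 [] = m.getD 0 [] := by
    simpa using PySem.List.pyGetD_natCast (xs := m) (n := 0) (d := [])
  simp only [hget, ← hcdef]
  -- first loop
  rw [pyRange_zero_cast, List.foldl_map]
  have hcast1 : ((m.length : Int) - 1) = ((m.length - 1 : Nat) : Int) := by omega
  have hstep1 : ∀ (x : List (List Int)) (j : Nat),
      setA (setA x 0 (Int.ofNat j)) ((m.length : Int) - 1) (Int.ofNat j)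
        = updRC (updRC x 0 j) (m.length - 1) j := by
    intro x j
    have h0 : setA x 0 (Int.ofNat j) = updRC x 0 j := by
      simpa [Int.ofNat_eq_natCast] using setA_cast x 0 j
    rw [h0, hcast1]
    simpa [Int.ofNat_eq_natCast] using setA_cast (updRC x 0 j) (m.length - 1) j
  simp only [hstep1]
  -- second loop
  have hrange : PySem.List.pyRange 1 ((m.length : Int) - 1) 1
      = (List.range (m.length - 2)).map (fun t => ((t + 1 : Nat) : Int)) := by
    rw [PySem.List.pyRange_one]
    have : ((m.length : Int) - 1 - 1).toNat = m.length - 2 := by omega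
    rw [this]
    exact List.map_congr_left (by intro a _; push_cast; ring)
  rw [hrange, List.foldl_map]
  have hcast2 : ((c : Int) - 1) = ((c - 1 : Nat) : Int) := by omega
  have hstep2 : ∀ (x : List (List Int)) (t : Nat),
      setA (setA x ((t + 1 : Nat) : Int) 0) ((t + 1 : Nat) : Int) ((c : Int) - 1)
        = x.set (t + 1) (midSet c (x.getD (t + 1) [])) := by
    intro x t
    have h1 : setA x ((t + 1 : Nat) : Int) 0 = x.set (t + 1) ((x.getD (t + 1) []).set 0 1) := by
      simpa [updRC] using setA_cast x (t + 1) 0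
    rw [h1, hcast2]
    have h2 := setA_cast (x.set (t + 1) ((x.getD (t + 1) []).set 0 1)) (t + 1) (c - 1)
    rw [h2]
    unfold updRC midSet
    rw [getD_set_self, List.set_set]
  simp only [hstep2]
  -- second loop elementwise via outer_rows
  have hfold := outer_rows (fun _ r => midSet c r)
    ((List.range (m.length - 2)).map (fun t => t + 1))
    (by
      refine List.Nodup.map ?_ (List.nodup_range)
      intro a b hab; simpa using hab)
    ((List.range c).foldl (fun x j => updRC (updRC x 0 j) (m.length - 1) j) m) k
  simp only [List.foldl_map] at hfold
  rw [hfold]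
  have hmem : (k ∈ (List.range (m.length - 2)).map (fun t => t + 1)) ↔ (1 ≤ k ∧ k < m.length - 1) := by
    simp only [List.mem_map, List.mem_range]
    constructor
    · rintro ⟨t, ht, rfl⟩; omega
    · rintro ⟨h1, h2⟩; exact ⟨k - 1, by omega, by omega⟩
  rw [loop1_getElem?]
  by_cases hk0 : k = 0 ∨ k = m.length - 1
  · have : ¬ (1 ≤ k ∧ k < m.length - 1) := by rcases hk0 with h | h <;> omega
    rw [if_neg (fun hx => this (hmem.mp hx)), if_pos hk0, if_pos hk0]
  · by_cases hk : 1 ≤ k ∧ k < m.length - 1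
    · rw [if_pos (hmem.mpr hk), if_neg hk0, if_neg hk0, if_pos hk]
    · rw [if_neg (fun hx => hk (hmem.mp hx)), if_neg hk0, if_neg hk0, if_neg hk]

-- ==== characterization of B ====

lemma portB_c_zero (m : List (List Int)) (hc : (m.getD 0 []).length = 0) :
    update_boundary_to_1_alt m = m := by
  unfold update_boundary_to_1_alt
  by_cases hm : m = []
  · rw [if_pos hm]
  · rw [if_neg hm]
    simp only [hc, List.range_zero, List.foldl_nil]
    exact foldl_id_of_mem _ _ _ (by intro a _; rfl)

lemma portB_getElem? (m : List (List Int)) (hm : m ≠ []) (k : Nat) :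
    (update_boundary_to_1_alt m)[k]?
      = if k < m.length then
          (m[k]?).map (fun r => (List.range (m.getD 0 []).length).foldl
            (fun r j => if k = 0 ∨ k = m.length - 1 ∨ j = 0 ∨ j = (m.getD 0 []).length - 1
              then r.set j 1 else r) r)
        else m[k]? := by
  unfold update_boundary_to_1_alt
  rw [if_neg hm]
  have hrw : (fun (m2 : List (List Int)) (i : Nat) =>
      (List.range (m.getD 0 []).length).foldl (fun m3 j =>
        if i = 0 ∨ i = m.length - 1 ∨ j = 0 ∨ j = (m.getD 0 []).length - 1
          then m3.set i ((m3.getD i []).set j 1) else m3) m2)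
      = (fun m2 i => m2.set i ((List.range (m.getD 0 []).length).foldl
          (fun r j => if i = 0 ∨ i = m.length - 1 ∨ j = 0 ∨ j = (m.getD 0 []).length - 1
            then r.set j 1 else r) (m2.getD i []))) := by
    funext m2 i
    exact inner_set_row _ (fun j => i = 0 ∨ i = m.length - 1 ∨ j = 0 ∨ j = (m.getD 0 []).length - 1) i m2
  simp only []
  rw [hrw]
  have hfold := outer_rows
    (fun i r => (List.range (m.getD 0 []).length).foldl
      (fun r j => if i = 0 ∨ i = m.length - 1 ∨ j = 0 ∨ j = (m.getD 0 []).length - 1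
        then r.set j 1 else r) r)
    (List.range m.length) List.nodup_range m k
  simp only [] at hfold
  rw [hfold]
  simp [List.mem_range]

-- B's per-row function on boundary rows is allSet
lemma rowB_boundary (c L k : Nat) (r : List Int) (hk : k = 0 ∨ k = L - 1) :
    (List.range c).foldl (fun r j => if k = 0 ∨ k = L - 1 ∨ j = 0 ∨ j = c - 1
      then r.set j 1 else r) r = allSet c r := by
  unfold allSet
  apply PySem.List.foldl_congr_mem
  intro acc x _
  rw [if_pos (by tauto)]

lemma filter_eq_zero (n : Nat) (hn : 1 ≤ n) :
    (List.range n).filter (fun j => decide (j = 0)) = [0] := by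
  induction n with
  | zero => omega
  | succ n ih =>
    by_cases h : n = 0
    · subst h; decide
    · rw [List.range_succ, List.filter_append, ih (by omega)]
      simp [h]

lemma filter_bound (c : Nat) (hc : 2 ≤ c) :
    (List.range c).filter (fun j => decide (j = 0 ∨ j = c - 1)) = [0, c - 1] := by
  have hsplit : List.range c = List.range (c - 1) ++ [c - 1] := by
    have : c = (c - 1) + 1 := by omega
    rw [this, List.range_succ, Nat.add_sub_cancel]
  rw [hsplit, List.filter_append]
  have h1 : (List.range (c - 1)).filter (fun j => decide (j = 0 ∨ j = c - 1))
      = (List.range (c - 1)).filter (fun j => decide (j = 0)) := by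
    apply List.filter_congr
    intro j hj
    rw [List.mem_range] at hj
    simp only [decide_eq_decide]
    omega
  rw [h1, filter_eq_zero _ (by omega)]
  simp

-- B's per-row function on interior rows is midSet
lemma rowB_mid (c L k : Nat) (r : List Int) (hc : 1 ≤ c) (hk0 : k ≠ 0) (hkL : k ≠ L - 1) :
    (List.range c).foldl (fun r j => if k = 0 ∨ k = L - 1 ∨ j = 0 ∨ j = c - 1
      then r.set j 1 else r) r = midSet c r := by
  have hcong : (List.range c).foldl (fun r j => if k = 0 ∨ k = L - 1 ∨ j = 0 ∨ j = c - 1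
      then r.set j 1 else r) r
      = (List.range c).foldl (fun r j => if j = 0 ∨ j = c - 1 then r.set j 1 else r) r := by
    apply PySem.List.foldl_congr_mem
    intro acc x _
    by_cases h : x = 0 ∨ x = c - 1
    · rw [if_pos (by tauto), if_pos h]
    · rw [if_neg (by tauto), if_neg h]
  rw [hcong, PySem.List.foldl_ite_eq_foldl_filter]
  by_cases h1 : c = 1
  · subst h1
    unfold midSet
    norm_num [List.set_set]
  · rw [filter_bound c (by omega)]
    unfold midSet
    rfl

-- ===== VERDICT (by name: the statement is the Claim_ definition above) =====
theorem update_boundary_to_1_spec : Claim_unchanged_update_boundary_to_1 := by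
  intro m _ hPre hnD
  by_cases hm : m = []
  · subst hm; rfl
  · by_cases hc : (m.getD 0 []).length = 0
    · -- zero-width first row: both sides leave m unchanged (no D, so interior rows are fixed by gA)
      have hc' : m.getD 0 [] = [] := List.length_eq_zero_iff.mp hc
      rw [portB_c_zero m hc]
      apply List.ext_getElem?
      intro k
      rw [portA_c_zero m hm hc' k]
      by_cases hk : 1 ≤ k ∧ k < m.length - 1
      · rw [if_pos hk]
        cases h : m[k]? with
        | none => rfl
        | some r =>
          have hrm : r ∈ (m.drop 1).dropLast := mem_mids m r k hk.1 hk.2 h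
          have hrne : r ≠ [] := hPre.1 hc r hrm
          have : ¬ (r ≠ [] ∧ (r.headI ≠ 1 ∨ r.getLastD 0 ≠ 1)) := by
            intro hbad
            exact hnD ⟨hm, hc', r, hrm, hbad⟩
          rw [not_and, not_or, not_ne_iff, not_ne_iff] at this
          have h1 := this hrne
          simp only [Option.map_some]
          rw [gA_id r (by tauto) (by tauto)]
      · rw [if_neg hk]
    · -- positive width: the two passes agree row by row
      have hL : 1 ≤ m.length := List.length_pos_iff.mpr hm
      apply List.ext_getElem?
      intro k
      rw [portA_c_pos m hm hc k, portB_getElem? m hm k]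
      by_cases hk0 : k = 0 ∨ k = m.length - 1
      · rw [if_pos hk0, if_pos (by rcases hk0 with h | h <;> omega)]
        congr 1
        funext r
        exact (rowB_boundary _ _ _ r hk0).symm
      · by_cases hk : 1 ≤ k ∧ k < m.length - 1
        · rw [if_neg hk0, if_pos hk, if_pos (by omega)]
          rw [not_or] at hk0
          congr 1
          funext r
          exact (rowB_mid _ _ _ r (by omega) hk0.1 hk0.2).symm
        · rw [if_neg hk0, if_neg hk, if_neg (by omega)]

theorem update_boundary_to_1_changed : Claim_changed_update_boundary_to_1 := by
  unfold Claim_changed_update_boundary_to_1; decide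

theorem update_boundary_to_1_tight : Claim_exact_update_boundary_to_1 := by
  intro m _ _ hD heq
  obtain ⟨hm, hc', r, hrm, hrne, hbad⟩ := hD
  have hc : (m.getD 0 []).length = 0 := by rw [hc']; rfl
  rw [portB_c_zero m hc] at heq
  obtain ⟨k, hk1, hk2, hk⟩ := mids_index m r hrm
  have hA := portA_c_zero m hm hc' k
  rw [heq, if_pos ⟨hk1, hk2⟩, hk] at hA
  simp only [Option.map_some, Option.some.injEq] at hA
  exact gA_ne r hrne hbad hA.symm
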